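-- pv_equiv track=rewrite | github.com/Akarshvamshi/onlineTitleSubmission | app1/utils.py | check_similar_meanings
-- ===== SOURCE A (Python) =====
-- def check_similar_meanings(title: str, existing_title: str) -> bool:
--     """Check if titles have similar meanings across languages."""
--     # Map of equivalent words in different languages
--     translation_map = {
--         'daily': {'pratidin', 'dainik'},
--         'evening': {'sandhya', 'sayankaal'},
--         'morning': {'pratah', 'subah'},
--         'news': {'samachar', 'vartha'},
--         'weekly': {'saptahik', 'vaaram'},
--         'monthly': {'masik', 'maasam'},
--     }
--
--     title_words = set(title.lower().split())
--     existing_words = set(existing_title.lower().split())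
--
--     for eng_word, translations in translation_map.items():
--         if (eng_word in title_words and translations.intersection(existing_words)) or \
--                 (eng_word in existing_words and translations.intersection(title_words)):
--             return True
--
--     return False
-- ===== SOURCE B (Python) =====
-- _TRANSLATIONS = {
--     'daily': ['pratidin', 'dainik'],
--     'evening': ['sandhya', 'sayankaal'],
--     'morning': ['pratah', 'subah'],
--     'news': ['samachar', 'vartha'],
--     'weekly': ['saptahik', 'vaaram'],
--     'monthly': ['masik', 'maasam'],
-- }
-- # inverted index: translation word -> its English concept
-- _INV = {t: eng for eng, ts in _TRANSLATIONS.items() for t in ts}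
--
--
-- def check_similar_meanings(title: str, existing_title: str) -> bool:
--     """Check if titles have similar meanings across languages."""
--     tw = set(title.lower().split())
--     ew = set(existing_title.lower().split())
--     t_eng = {w for w in tw if w in _TRANSLATIONS}
--     e_eng = {w for w in ew if w in _TRANSLATIONS}
--     t_con = {_INV[w] for w in tw if w in _INV}
--     e_con = {_INV[w] for w in ew if w in _INV}
--     return bool((t_eng & e_con) or (e_eng & t_con))
-- ===== Notes on version B (the rewrite author's own statement) =====
-- stated objective: idiomatic
-- what changed: Replaced the per-concept loop with bidirectional membership tests by a precomputed inverted index (translation word -> English concept): each title yields a set of English keys and a set of concepts reached through its translation words, and the answer is two set intersections.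
import Mathlib
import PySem

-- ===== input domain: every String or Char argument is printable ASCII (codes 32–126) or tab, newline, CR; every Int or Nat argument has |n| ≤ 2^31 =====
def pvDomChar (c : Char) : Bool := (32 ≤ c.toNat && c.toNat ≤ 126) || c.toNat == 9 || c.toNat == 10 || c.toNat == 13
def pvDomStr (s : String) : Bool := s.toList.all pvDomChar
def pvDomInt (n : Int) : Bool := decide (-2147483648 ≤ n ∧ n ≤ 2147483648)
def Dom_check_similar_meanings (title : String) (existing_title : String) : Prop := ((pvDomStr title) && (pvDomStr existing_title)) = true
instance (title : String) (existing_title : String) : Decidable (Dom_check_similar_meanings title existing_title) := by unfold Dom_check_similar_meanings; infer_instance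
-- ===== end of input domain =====

-- B replaces A's per-concept loop with bidirectional membership tests by a precomputed
-- inverted index (translation word -> English concept) and two set intersections (idiomatic).
-- ===== PORT A =====
def pvTranslationMap : List (String × PySem.Set String) :=
  [("daily",   PySem.Set.ofList ["pratidin", "dainik"]),
   ("evening", PySem.Set.ofList ["sandhya", "sayankaal"]),
   ("morning", PySem.Set.ofList ["pratah", "subah"]),
   ("news",    PySem.Set.ofList ["samachar", "vartha"]),
   ("weekly",  PySem.Set.ofList ["saptahik", "vaaram"]),
   ("monthly", PySem.Set.ofList ["masik", "maasam"])]

-- the for-loop with early 'return True'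
def pvLoopA (tw ew : PySem.Set String) : List (String × PySem.Set String) → Bool
  | [] => false
  | (eng, transl) :: rest =>
    if (PySem.Set.contains tw eng && !(PySem.Set.inter transl ew).isEmpty)
        || (PySem.Set.contains ew eng && !(PySem.Set.inter transl tw).isEmpty) then true
    else pvLoopA tw ew rest

def check_similar_meanings (title : String) (existing_title : String) : Bool :=
  let title_words := PySem.Set.ofList (PySem.Str.split₀ (PySem.Str.lower title))
  let existing_words := PySem.Set.ofList (PySem.Str.split₀ (PySem.Str.lower existing_title))
  pvLoopA title_words existing_words pvTranslationMap

-- ===== PORT B =====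
def pvTransB : PySem.Dict String (List String) :=
  PySem.Dict.ofList
    [("daily",   ["pratidin", "dainik"]),
     ("evening", ["sandhya", "sayankaal"]),
     ("morning", ["pratah", "subah"]),
     ("news",    ["samachar", "vartha"]),
     ("weekly",  ["saptahik", "vaaram"]),
     ("monthly", ["masik", "maasam"])]

-- _INV = {t: eng for eng, ts in _TRANSLATIONS.items() for t in ts}
def pvInv : PySem.Dict String String :=
  pvTransB.items.foldl (fun d p => p.2.foldl (fun d t => d.insert t p.1) d) PySem.Dict.empty

def check_similar_meanings_alt (title : String) (existing_title : String) : Bool :=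
  let tw := PySem.Set.ofList (PySem.Str.split₀ (PySem.Str.lower title))
  let ew := PySem.Set.ofList (PySem.Str.split₀ (PySem.Str.lower existing_title))
  let t_eng := PySem.Set.ofList (tw.filter (fun w => PySem.Dict.contains pvTransB w))
  let e_eng := PySem.Set.ofList (ew.filter (fun w => PySem.Dict.contains pvTransB w))
  let t_con := PySem.Set.ofList (tw.filterMap (fun w => PySem.Dict.get? pvInv w))
  let e_con := PySem.Set.ofList (ew.filterMap (fun w => PySem.Dict.get? pvInv w))
  !(PySem.Set.inter t_eng e_con).isEmpty || !(PySem.Set.inter e_eng t_con).isEmpty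

-- ===== PRECONDITION & SPEC =====
def Spec_check_similar_meanings (title : String) (existing_title : String) (out : Bool) : Prop := out = check_similar_meanings_alt title existing_title
instance (title : String) (existing_title : String) (out : Bool) : Decidable (Spec_check_similar_meanings title existing_title out) := by unfold Spec_check_similar_meanings; infer_instance

-- ===== CLAIM (what is proved, stated in full; the proofs are below) =====
def Claim_equal_check_similar_meanings : Prop := ∀ (title : String) (existing_title : String), Dom_check_similar_meanings title existing_title → Spec_check_similar_meanings title existing_title (check_similar_meanings title existing_title)

-- ===== LEMMAS AND PROOFS =====
theorem pvTransB_eq : pvTransB = PySem.Dict.mk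
    [("daily", ["pratidin", "dainik"]), ("evening", ["sandhya", "sayankaal"]), ("morning", ["pratah", "subah"]),
     ("news", ["samachar", "vartha"]), ("weekly", ["saptahik", "vaaram"]), ("monthly", ["masik", "maasam"])] := by decide

theorem pvInv_eq : pvInv = PySem.Dict.mk
    [("pratidin","daily"),("dainik","daily"),("sandhya","evening"),("sayankaal","evening"),
     ("pratah","morning"),("subah","morning"),("samachar","news"),("vartha","news"),
     ("saptahik","weekly"),("vaaram","weekly"),("masik","monthly"),("maasam","monthly")] := by decide

theorem transB_contains (x : String) : PySem.Dict.contains pvTransB x = true ↔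
    x = "daily" ∨ x = "evening" ∨ x = "morning" ∨ x = "news" ∨ x = "weekly" ∨ x = "monthly" := by
  rw [pvTransB_eq, PySem.Dict.contains_eq_decide_mem_keys]
  simp [PySem.Dict.keys_mk]

set_option maxHeartbeats 1000000 in
theorem inv_get (w x : String) : PySem.Dict.get? pvInv w = some x ↔
    (w = "pratidin" ∨ w = "dainik") ∧ x = "daily" ∨
    (w = "sandhya" ∨ w = "sayankaal") ∧ x = "evening" ∨
    (w = "pratah" ∨ w = "subah") ∧ x = "morning" ∨
    (w = "samachar" ∨ w = "vartha") ∧ x = "news" ∨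
    (w = "saptahik" ∨ w = "vaaram") ∧ x = "weekly" ∨
    (w = "masik" ∨ w = "maasam") ∧ x = "monthly" := by
  rw [pvInv_eq]
  simp only [PySem.Dict.get?_mk_cons, beq_iff_eq]
  split_ifs with h1 h2 h3 h4 h5 h6 h7 h8 h9 h10 h11 h12 <;>
    simp_all [PySem.Dict.get?, eq_comm]

theorem mem_eq_iff {α : Type} (ws : List α) (c : α) (Q : α → Prop) :
    (∃ x, x ∈ ws ∧ x = c ∧ Q x) ↔ c ∈ ws ∧ Q c := by
  constructor
  · rintro ⟨x, hx, rfl, hq⟩; exact ⟨hx, hq⟩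
  · rintro ⟨hc, hq⟩; exact ⟨c, hc, rfl, hq⟩

theorem if_true_or (c b : Bool) : (if c = true then true else b) = (c || b) := by
  cases c <;> simp

theorem pvLoopA_eq_any (tw ew : PySem.Set String) (l : List (String × PySem.Set String)) :
    pvLoopA tw ew l = l.any (fun p =>
      (PySem.Set.contains tw p.1 && !(PySem.Set.inter p.2 ew).isEmpty)
        || (PySem.Set.contains ew p.1 && !(PySem.Set.inter p.2 tw).isEmpty)) := by
  induction l with
  | nil => rfl
  | cons hd tl ih => cases hd with | mk a b => rw [pvLoopA, if_true_or, ih, List.any_cons]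

theorem inter_nonempty (s t : PySem.Set String) :
    (!(PySem.Set.inter s t).isEmpty) = true ↔ ∃ x, x ∈ s ∧ x ∈ t := by
  simp only [Bool.not_eq_true', List.isEmpty_eq_false_iff_exists_mem, PySem.Set.mem_inter]

set_option maxHeartbeats 8000000 in
theorem core (ws1 ws2 : List String) :
    pvLoopA (PySem.Set.ofList ws1) (PySem.Set.ofList ws2) pvTranslationMap =
    (!(PySem.Set.inter (PySem.Set.ofList ((PySem.Set.ofList ws1).filter (fun w => PySem.Dict.contains pvTransB w)))
        (PySem.Set.ofList ((PySem.Set.ofList ws2).filterMap (fun w => PySem.Dict.get? pvInv w)))).isEmpty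
      || !(PySem.Set.inter (PySem.Set.ofList ((PySem.Set.ofList ws2).filter (fun w => PySem.Dict.contains pvTransB w)))
        (PySem.Set.ofList ((PySem.Set.ofList ws1).filterMap (fun w => PySem.Dict.get? pvInv w)))).isEmpty) := by
  rw [Bool.eq_iff_iff]
  rw [pvLoopA_eq_any]
  simp only [pvTranslationMap, List.any_cons, List.any_nil, Bool.or_eq_true, Bool.and_eq_true,
    inter_nonempty, PySem.Set.contains_iff, PySem.Set.mem_ofList, List.mem_filter,
    List.mem_filterMap, transB_contains, inv_get, List.mem_cons, List.not_mem_nil, or_false,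
    Bool.or_false]
  simp only [or_and_right, and_or_left, and_assoc, exists_or, exists_eq_left, exists_eq_left',
    exists_and_left, eq_self_iff_true, true_and, and_true, mem_eq_iff]
  simp only [String.reduceEq, and_false, false_and, false_or, or_false, and_true]
  simp only [or_assoc, or_comm, or_left_comm]

-- ===== VERDICT (by name: the statement is the Claim_ definition above) =====
theorem check_similar_meanings_spec : Claim_equal_check_similar_meanings := by
  intro title existing_title _
  unfold Spec_check_similar_meanings check_similar_meanings check_similar_meanings_alt
  exact core (PySem.Str.split₀ (PySem.Str.lower title)) (PySem.Str.split₀ (PySem.Str.lower existing_title))
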